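-- pv_equiv track=rewrite | github.com/leukim/sensetest | src/fourth.py | get_grid
-- ===== SOURCE A (Python) =====
-- B = [0, 0, 0]
--
-- W = [255, 255, 255]
--
-- R = [255, 0, 0]
--
-- def get_grid(dot, painted):
--     pixels = []
--     for x_index in range(8):
--         for y_index in range(8):
--             if x_index == dot[0] and y_index == dot[1]:
--                 pixels.append(W)
--             elif [x_index, y_index] in painted:
--                 pixels.append(R)
--             else:
--                 pixels.append(B)
--     return pixels
-- ===== SOURCE B (Python) =====
-- B = [0, 0, 0]
--
-- W = [255, 255, 255]
--
-- R = [255, 0, 0]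
--
-- def get_grid(dot, painted):
--     grid = [B] * 64
--     for p in painted:
--         if len(p) == 2 and 0 <= p[0] < 8 and 0 <= p[1] < 8:
--             grid[p[0] * 8 + p[1]] = R
--     if 0 <= dot[0] < 8 and 0 <= dot[1] < 8:
--         grid[dot[0] * 8 + dot[1]] = W
--     return grid
-- ===== Notes on version B (the rewrite author's own statement) =====
-- stated objective: simpler
-- what changed: B scatters: it initializes a flat all-black 64-cell grid, writes R at each in-range painted coordinate, then writes W at the dot, instead of scanning all 64 cells and testing list membership for each.
import Mathlib
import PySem

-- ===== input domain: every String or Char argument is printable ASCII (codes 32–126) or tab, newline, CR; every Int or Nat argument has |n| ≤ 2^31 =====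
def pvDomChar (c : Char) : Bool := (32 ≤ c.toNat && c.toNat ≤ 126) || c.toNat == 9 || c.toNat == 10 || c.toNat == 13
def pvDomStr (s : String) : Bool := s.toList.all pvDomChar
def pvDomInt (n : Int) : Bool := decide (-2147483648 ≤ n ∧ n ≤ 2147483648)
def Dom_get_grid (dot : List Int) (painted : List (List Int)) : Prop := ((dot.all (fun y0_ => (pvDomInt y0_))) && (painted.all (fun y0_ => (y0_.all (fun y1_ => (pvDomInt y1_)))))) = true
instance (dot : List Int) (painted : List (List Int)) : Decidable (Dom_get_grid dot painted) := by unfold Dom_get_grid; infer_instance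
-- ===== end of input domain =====

-- B scatters writes into an all-black 64-cell grid (paint R, then the dot W) instead of
-- scanning all 64 cells and testing membership per cell; return values agree wherever A
-- returns (B raises on exactly the same inputs, which Pre_ excludes).

-- ===== PORT A =====
def pixB : List Int := [0, 0, 0]
def pixW : List Int := [255, 255, 255]
def pixR : List Int := [255, 0, 0]

-- literal transliteration of A: nested loops over range(8), append per cell;
-- `x == dot[0] and y == dot[1]` short-circuits, so dot[1] is only read when the first
-- test can pass (pyGet? = none is Python's IndexError; those inputs are outside Pre_).
def get_grid (dot : List Int) (painted : List (List Int)) : List (List Int) :=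
  (PySem.List.pyRange 0 8 1).foldl (fun pixels x =>
    (PySem.List.pyRange 0 8 1).foldl (fun pixels y =>
      if PySem.List.pyGet? dot 0 = some x ∧ PySem.List.pyGet? dot 1 = some y then
        pixels ++ [pixW]
      else if [x, y] ∈ painted then
        pixels ++ [pixR]
      else
        pixels ++ [pixB]) pixels) []

-- ===== PORT B =====
-- Source B's paint step: `if len(p) == 2 and 0 <= p[0] < 8 and 0 <= p[1] < 8: grid[p[0]*8+p[1]] = R`
def paintStep (g : List (List Int)) (p : List Int) : List (List Int) :=
  match p with
  | [px, py] => if 0 ≤ px ∧ px < 8 ∧ 0 ≤ py ∧ py < 8 then g.set (px * 8 + py).toNat pixR else g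
  | _ => g

def get_grid_alt (dot : List Int) (painted : List (List Int)) : List (List Int) :=
  let grid := painted.foldl paintStep (List.replicate 64 pixB)
  -- `if 0 <= dot[0] < 8 and 0 <= dot[1] < 8: grid[dot[0]*8+dot[1]] = W`, short-circuiting
  -- exactly as in Python (pyGet? = none is IndexError, outside Pre_)
  match PySem.List.pyGet? dot 0 with
  | none => grid
  | some dx =>
    if 0 ≤ dx ∧ dx < 8 then
      match PySem.List.pyGet? dot 1 with
      | none => grid
      | some dy => if 0 ≤ dy ∧ dy < 8 then grid.set (dx * 8 + dy).toNat pixW else grid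
    else grid

-- ===== PRECONDITION & SPEC =====
-- Pre_ excludes exactly the inputs where A raises IndexError: dot = [] (dot[0] fails), or a
-- one-element dot whose entry lies in 0..7 (the short-circuit then reads dot[1]); B raises
-- on exactly the same inputs, so nothing A returns on is excluded.
def Pre_get_grid (dot : List Int) (painted : List (List Int)) : Prop :=
  dot ≠ [] ∧ (dot.length = 1 → ¬ (0 ≤ dot.headI ∧ dot.headI < 8))

instance (dot : List Int) (painted : List (List Int)) : Decidable (Pre_get_grid dot painted) := by
  unfold Pre_get_grid; infer_instance

def pvWitness_get_grid : List Int × List (List Int) := ([2, 3], [[0, 1], [7, 7]])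

def Spec_get_grid (dot : List Int) (painted : List (List Int)) (out : List (List Int)) : Prop := out = get_grid_alt dot painted
instance (dot : List Int) (painted : List (List Int)) (out : List (List Int)) : Decidable (Spec_get_grid dot painted out) := by unfold Spec_get_grid; infer_instance

-- ===== CLAIM (what is proved, stated in full; the proofs are below) =====
def Claim_equal_get_grid : Prop := ∀ (dot : List Int) (painted : List (List Int)), Dom_get_grid dot painted → Pre_get_grid dot painted → Spec_get_grid dot painted (get_grid dot painted)

-- ===== LEMMAS AND PROOFS =====

-- canonical form both ports are reduced to: a 64-cell grid given by a cell function
def gridmap (f : Nat → List Int) : List (List Int) := (List.range 64).map f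

lemma gridmap_congr {f g : Nat → List Int} (h : ∀ i, i < 64 → f i = g i) : gridmap f = gridmap g :=
  List.map_congr_left (fun i hi => h i (List.mem_range.mp hi))

lemma set_gridmap (f : Nat → List Int) (n : Nat) (v : List Int) :
    (gridmap f).set n v = gridmap (fun i => if i = n then v else f i) := by
  unfold gridmap
  apply List.ext_getElem
  · simp
  · intro i h1 h2
    simp only [List.length_set, List.length_map, List.length_range] at h1
    simp only [List.getElem_set, List.getElem_map, List.getElem_range]
    by_cases h : i = n
    · simp [h]
    · rw [if_neg (fun hh => h hh.symm), if_neg h]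

lemma replicate_gridmap : List.replicate 64 pixB = gridmap (fun _ => pixB) := by
  unfold gridmap
  simp [List.map_const']

-- does painted entry p paint cell i?
def hitb (p : List Int) (i : Nat) : Bool :=
  match p with
  | [px, py] => decide (0 ≤ px ∧ px < 8 ∧ 0 ≤ py ∧ py < 8 ∧ (px * 8 + py).toNat = i)
  | _ => false

lemma paintStep_gridmap (f : Nat → List Int) (p : List Int) :
    paintStep (gridmap f) p = gridmap (fun i => if hitb p i then pixR else f i) := by
  unfold paintStep hitb
  match p with
  | [] => simp [gridmap]
  | [a] => simp [gridmap]
  | (a :: b :: c :: t) => simp [gridmap]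
  | [px, py] =>
    dsimp only
    split_ifs with h
    · obtain ⟨h1, h2, h3, h4⟩ := h
      rw [set_gridmap]
      apply gridmap_congr
      intro i _
      by_cases hi : i = (px * 8 + py).toNat
      · simp [hi, h1, h2, h3, h4]
      · simp only [hi, if_false, decide_eq_true_eq]
        rw [if_neg]
        rintro ⟨-, -, -, -, h'⟩
        exact hi h'.symm
    · apply gridmap_congr
      intro i _
      simp only [decide_eq_true_eq]
      rw [if_neg]
      rintro ⟨a1, a2, a3, a4, -⟩
      exact h ⟨a1, a2, a3, a4⟩

-- invariant of B's painting fold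
lemma paint_fold (l : List (List Int)) (f : Nat → List Int) :
    l.foldl paintStep (gridmap f) = gridmap (fun i => if l.any (fun p => hitb p i) then pixR else f i) := by
  induction l generalizing f with
  | nil => simp [gridmap]
  | cons p t ih =>
    simp only [List.foldl_cons, paintStep_gridmap, ih, List.any_cons]
    apply gridmap_congr
    intro i _
    by_cases hp : hitb p i
    · simp [hp]
    · simp [hp]

-- the per-cell value A appends at cell (x, y)
def cellA (dot : List Int) (painted : List (List Int)) (x y : Int) : List Int :=
  if PySem.List.pyGet? dot 0 = some x ∧ PySem.List.pyGet? dot 1 = some y then pixW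
  else if [x, y] ∈ painted then pixR
  else pixB

-- A's nested append-loops, flattened
lemma a_flat (dot : List Int) (painted : List (List Int)) :
    get_grid dot painted =
      (PySem.List.pyRange 0 8 1).flatMap (fun x => (PySem.List.pyRange 0 8 1).map (cellA dot painted x)) := by
  unfold get_grid
  have hb : ∀ (pixels : List (List Int)) (x y : Int),
      (if PySem.List.pyGet? dot 0 = some x ∧ PySem.List.pyGet? dot 1 = some y then pixels ++ [pixW]
       else if [x, y] ∈ painted then pixels ++ [pixR]
       else pixels ++ [pixB]) = pixels ++ [cellA dot painted x y] := by
    intro pixels x y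
    unfold cellA
    split_ifs <;> rfl
  simp only [hb, PySem.List.foldl_append_singleton_eq_map, PySem.List.foldl_append_eq_flatMap,
    List.nil_append]

-- A as a gridmap
lemma get_grid_eq_gridmap (dot : List Int) (painted : List (List Int)) :
    get_grid dot painted = gridmap (fun i => cellA dot painted ((i / 8 : Nat) : Int) ((i % 8 : Nat) : Int)) := by
  rw [a_flat]
  have hr : PySem.List.pyRange 0 8 1 = [0, 1, 2, 3, 4, 5, 6, 7] := by decide
  have hR : List.range 64 = [0, 1, 2, 3, 4, 5, 6, 7, 8, 9, 10, 11, 12, 13, 14, 15, 16, 17, 18, 19, 20, 21, 22, 23, 24, 25, 26, 27, 28, 29, 30, 31, 32, 33, 34, 35, 36, 37, 38, 39, 40, 41, 42, 43, 44, 45, 46, 47, 48, 49, 50, 51, 52, 53, 54, 55, 56, 57, 58, 59, 60, 61, 62, 63] := by decide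
  rw [hr]
  unfold gridmap
  rw [hR]
  norm_num [List.flatMap_cons, List.flatMap_nil, List.map_cons, List.map_nil]

-- the paint predicate at cell i < 64 is A's membership test there
lemma mem_iff_hit (painted : List (List Int)) (i : Nat) (hi : i < 64) :
    ([((i / 8 : Nat) : Int), ((i % 8 : Nat) : Int)] ∈ painted) ↔ (painted.any (fun p => hitb p i) = true) := by
  rw [List.any_eq_true]
  constructor
  · intro hmem
    refine ⟨_, hmem, ?_⟩
    unfold hitb
    simp only [decide_eq_true_eq]
    refine ⟨by positivity, ?_, by positivity, ?_, ?_⟩ <;> omega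
  · rintro ⟨p, hp, hhit⟩
    unfold hitb at hhit
    match p with
    | [] => simp at hhit
    | [a] => simp at hhit
    | (a :: b :: c :: t) => simp at hhit
    | [px, py] =>
      simp only [decide_eq_true_eq] at hhit
      obtain ⟨h1, h2, h3, h4, h5⟩ := hhit
      have hx : px = ((i / 8 : Nat) : Int) := by omega
      have hy : py = ((i % 8 : Nat) : Int) := by omega
      rw [hx, hy] at hp
      exact hp

-- the painted-fold part of B, as a gridmap
lemma gridP_eq (painted : List (List Int)) :
    painted.foldl paintStep (List.replicate 64 pixB) =
      gridmap (fun i => if painted.any (fun p => hitb p i) then pixR else pixB) := by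
  rw [replicate_gridmap, paint_fold]

theorem get_grid_spec : Claim_equal_get_grid := by
  intro dot painted _ hpre
  unfold Spec_get_grid get_grid_alt
  rw [get_grid_eq_gridmap, gridP_eq]
  obtain ⟨hne, h1⟩ := hpre
  match dot with
  | [] => exact absurd rfl hne
  | (d0 :: rest) =>
    have hg0 : PySem.List.pyGet? (d0 :: rest) 0 = some d0 := by
      simp [PySem.List.pyGet?, PySem.List.pyIdx?]
    rw [hg0]
    simp only []
    by_cases hd0 : 0 ≤ d0 ∧ d0 < 8
    · rw [if_pos hd0]
      match rest with
      | [] => exact absurd hd0 (by simpa using h1)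
      | (d1 :: rest') =>
        have hg1 : PySem.List.pyGet? (d0 :: d1 :: rest') 1 = some d1 := by
          simp [PySem.List.pyGet?, PySem.List.pyIdx?]
        rw [hg1]
        simp only []
        by_cases hd1 : 0 ≤ d1 ∧ d1 < 8
        · rw [if_pos hd1, set_gridmap]
          apply gridmap_congr
          intro i hi
          unfold cellA
          rw [hg0, hg1]
          by_cases hcell : i = (d0 * 8 + d1).toNat
          · rw [if_pos hcell, if_pos (show some d0 = some ((i / 8 : Nat) : Int) ∧
                some d1 = some ((i % 8 : Nat) : Int) by
              subst hcell
              exact ⟨by congr 1; omega, by congr 1; omega⟩)]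
          · rw [if_neg hcell, if_neg (show ¬(some d0 = some ((i / 8 : Nat) : Int) ∧
                some d1 = some ((i % 8 : Nat) : Int)) by
              rintro ⟨e0, e1⟩
              simp only [Option.some.injEq] at e0 e1
              exact hcell (by omega))]
            simp only [mem_iff_hit painted i hi]
        · rw [if_neg hd1]
          apply gridmap_congr
          intro i hi
          unfold cellA
          rw [hg0, hg1, if_neg (show ¬(some d0 = some ((i / 8 : Nat) : Int) ∧
              some d1 = some ((i % 8 : Nat) : Int)) by
            rintro ⟨-, e1⟩
            simp only [Option.some.injEq] at e1
            omega)]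
          simp only [mem_iff_hit painted i hi]
    · rw [if_neg hd0]
      apply gridmap_congr
      intro i hi
      unfold cellA
      rw [hg0, if_neg (show ¬(some d0 = some ((i / 8 : Nat) : Int) ∧
          PySem.List.pyGet? (d0 :: rest) 1 = some ((i % 8 : Nat) : Int)) by
        rintro ⟨e0, -⟩
        simp only [Option.some.injEq] at e0
        omega)]
      simp only [mem_iff_hit painted i hi]
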